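-- pv_equiv track=rewrite | github.com/brandonsladek/python-bin-packing | bin_packing_wc.py | find_perimeter_of_column_stacking
-- ===== SOURCE A (Python) =====
-- def find_perimeter_of_column_stacking(columns, num_columns, column_width_increment):
--     # Calculate the total width of the packing
--     x = calc_total_width(num_columns, column_width_increment)
--     max_column_height = 0
--
--     # Find the value of the height of the tallest column
--     for i in range(len(columns)):
--         cur_height = get_column_height(columns[i])
--         if (cur_height > max_column_height):
--             max_column_height = cur_height
--
--     y = max_column_height
--
--     # Calculate perimeter and return
--     return (2 * y) + (2 * x)
--
-- def get_column_height(column_dict):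
--     column_height = 0
--     for key, value, in column_dict.items():
--         column_height = column_height + value[1]
--
--     return column_height
--
-- def calc_total_width(num_columns, column_width_increment):
--     col_width = 0
--     total_width = 0
--
--     # Go through each column and add its width to the total width
--     for i in range(num_columns):
--         col_width = col_width + column_width_increment
--         total_width = total_width + col_width
--
--     return total_width
-- ===== SOURCE B (Python) =====
-- def find_perimeter_of_column_stacking(columns, num_columns, column_width_increment):
--     n = num_columns if num_columns > 0 else 0
--     total_width = column_width_increment * (n * (n + 1) // 2)
--     height = max([0] + [sum(v[1] for v in col.values()) for col in columns])
--     return 2 * height + 2 * total_width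
-- ===== Notes on version B (the rewrite author's own statement) =====
-- stated objective: simpler
-- what changed: Replaces the width-accumulation loop with the Gauss closed form column_width_increment * n*(n+1)//2 (for n > 0) and the index-tracking max loop plus both helpers with a single max over per-column sums.
-- outside the precondition, e.g. on find_perimeter_of_column_stacking([{'a': [1]}], 1, 1): A raises IndexError, B raises IndexError
import Mathlib
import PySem

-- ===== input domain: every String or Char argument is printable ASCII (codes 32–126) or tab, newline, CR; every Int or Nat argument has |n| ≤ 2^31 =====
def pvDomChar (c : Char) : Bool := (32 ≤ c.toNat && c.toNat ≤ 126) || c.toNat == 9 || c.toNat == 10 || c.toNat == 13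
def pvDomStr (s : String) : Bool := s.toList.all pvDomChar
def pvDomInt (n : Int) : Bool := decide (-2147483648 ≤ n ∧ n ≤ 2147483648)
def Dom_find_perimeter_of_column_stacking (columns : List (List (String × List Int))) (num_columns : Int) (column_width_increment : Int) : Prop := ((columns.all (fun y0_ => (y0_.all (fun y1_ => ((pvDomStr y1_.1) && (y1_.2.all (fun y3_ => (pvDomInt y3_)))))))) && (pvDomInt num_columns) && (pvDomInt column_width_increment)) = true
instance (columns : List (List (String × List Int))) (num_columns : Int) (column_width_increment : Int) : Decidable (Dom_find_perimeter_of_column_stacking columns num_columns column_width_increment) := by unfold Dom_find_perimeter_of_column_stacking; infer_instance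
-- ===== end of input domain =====

-- ===== PORT A =====
-- B replaces A's width loop by the Gauss closed form and the index/helper max loop by map+max; objective: simpler.
-- helper: get_column_height (dict.items() loop; value[1] is an IndexError when the list is shorter — excluded by Pre_)
def pvGetColumnHeight (column_dict : List (String × List Int)) : Int :=
  column_dict.foldl (fun column_height kv => column_height + PySem.List.pyGetD kv.2 1 0) 0

-- helper: calc_total_width (running col_width accumulated into total_width)
def pvCalcTotalWidth (num_columns : Int) (column_width_increment : Int) : Int :=
  ((PySem.List.pyRange 0 num_columns 1).foldl
    (fun s _ => (s.1 + column_width_increment, s.2 + (s.1 + column_width_increment)))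
    ((0 : Int), (0 : Int))).2

def find_perimeter_of_column_stacking (columns : List (List (String × List Int))) (num_columns : Int) (column_width_increment : Int) : Int :=
  let x := pvCalcTotalWidth num_columns column_width_increment
  let y := (PySem.List.pyRange 0 (columns.length : Int) 1).foldl
    (fun max_column_height i =>
      let cur_height := pvGetColumnHeight (PySem.List.pyGetD columns i [])
      if cur_height > max_column_height then cur_height else max_column_height) 0
  2 * y + 2 * x

-- ===== PORT B =====
def find_perimeter_of_column_stacking_alt (columns : List (List (String × List Int))) (num_columns : Int) (column_width_increment : Int) : Int :=
  let n := if num_columns > 0 then num_columns else 0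
  let total_width := column_width_increment * PySem.Int.floordiv (n * (n + 1)) 2
  let height := (columns.map (fun col => (col.map (fun kv => PySem.List.pyGetD kv.2 1 0)).sum)).foldl max 0
  2 * height + 2 * total_width

-- ===== PRECONDITION & SPEC =====
-- Pre_ excludes columns containing a value list shorter than 2 (value[1] raises IndexError in A and in B),
-- and columns with duplicate keys, where the Python dict collapses entries and the association-list reading is ambiguous.
def Pre_find_perimeter_of_column_stacking (columns : List (List (String × List Int))) (num_columns : Int) (column_width_increment : Int) : Prop :=
  ∀ col ∈ columns, (col.map Prod.fst).Nodup ∧ ∀ kv ∈ col, 2 ≤ kv.2.length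
instance (columns : List (List (String × List Int))) (num_columns : Int) (column_width_increment : Int) : Decidable (Pre_find_perimeter_of_column_stacking columns num_columns column_width_increment) := by unfold Pre_find_perimeter_of_column_stacking; infer_instance
def pvWitness_find_perimeter_of_column_stacking : (List (List (String × List Int))) × Int × Int :=
  ([[("a", [1, 2])], [("b", [3, 4]), ("c", [5, 6])]], 3, 2)

def Spec_find_perimeter_of_column_stacking (columns : List (List (String × List Int))) (num_columns : Int) (column_width_increment : Int) (out : Int) : Prop := out = find_perimeter_of_column_stacking_alt columns num_columns column_width_increment
instance (columns : List (List (String × List Int))) (num_columns : Int) (column_width_increment : Int) (out : Int) : Decidable (Spec_find_perimeter_of_column_stacking columns num_columns column_width_increment out) := by unfold Spec_find_perimeter_of_column_stacking; infer_instance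

-- ===== CLAIM (what is proved, stated in full; the proofs are below) =====
def Claim_equal_find_perimeter_of_column_stacking : Prop := ∀ (columns : List (List (String × List Int))) (num_columns : Int) (column_width_increment : Int), Dom_find_perimeter_of_column_stacking columns num_columns column_width_increment → Pre_find_perimeter_of_column_stacking columns num_columns column_width_increment → Spec_find_perimeter_of_column_stacking columns num_columns column_width_increment (find_perimeter_of_column_stacking columns num_columns column_width_increment)

-- ===== LEMMAS AND PROOFS =====

-- width loop invariant: after k steps, col_width = inc*k and 2*total_width = inc*k*(k+1)
theorem pvWidthLoop (inc : Int) (k : Nat) :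
    ((List.range k).foldl (fun (s : Int × Int) (_ : Nat) => (s.1 + inc, s.2 + (s.1 + inc))) ((0 : Int), (0 : Int)))
      = (inc * k, inc * (k * (k + 1) / 2)) := by
  induction k with
  | zero => simp
  | succ m ih =>
    rw [List.range_succ, List.foldl_append, ih]
    simp only [List.foldl_cons, List.foldl_nil]
    have h2 : (2 : Int) ∣ (m : Int) * (m + 1) := Int.even_mul_succ_self (m : Int) |>.two_dvd
    obtain ⟨j, hj⟩ := h2
    have h2' : (2 : Int) ∣ ((m : Int) + 1) * ((m : Int) + 1 + 1) := Int.even_mul_succ_self _ |>.two_dvd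
    obtain ⟨j', hj'⟩ := h2'
    have e1 : (m : Int) * (m + 1) / 2 = j := by rw [hj]; omega
    have e2 : ((m : Int) + 1) * ((m : Int) + 1 + 1) / 2 = j' := by rw [hj']; omega
    rw [Prod.mk.injEq]
    constructor
    · push_cast; ring
    · push_cast
      rw [e1, e2]
      have : j' = j + ((m : Int) + 1) := by nlinarith [hj, hj']
      rw [this]; ring

theorem pvCalcTotalWidth_closed (num_columns inc : Int) :
    pvCalcTotalWidth num_columns inc
      = inc * PySem.Int.floordiv ((if num_columns > 0 then num_columns else 0) * ((if num_columns > 0 then num_columns else 0) + 1)) 2 := by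
  unfold pvCalcTotalWidth
  rw [PySem.Int.floordiv_eq_ediv_of_pos (by omega)]
  rw [PySem.List.pyRange_one, List.foldl_map, pvWidthLoop]
  have hm : (((num_columns - 0).toNat : Int)) = (if num_columns > 0 then num_columns else 0) := by
    split_ifs <;> omega
  rw [hm]

-- the max-update step is Int.max
theorem pvMaxStep (H : List (String × List Int) → Int) :
    (fun (m : Int) (col : List (String × List Int)) =>
        let h := H col; if h > m then h else m)
      = fun m col => max m (H col) := by
  funext m col
  simp only [gt_iff_lt]
  split_ifs with h <;> omega

theorem pvHeight_eq (columns : List (List (String × List Int))) :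
    (PySem.List.pyRange 0 (columns.length : Int) 1).foldl
      (fun max_column_height i =>
        let cur_height := pvGetColumnHeight (PySem.List.pyGetD columns i [])
        if cur_height > max_column_height then cur_height else max_column_height) 0
    = (columns.map (fun col => (col.map (fun kv => PySem.List.pyGetD kv.2 1 0)).sum)).foldl max 0 := by
  rw [PySem.List.foldl_pyRange_zero_pyGetD' columns []
      (fun m col => let h := pvGetColumnHeight col; if h > m then h else m) 0,
      pvMaxStep, List.foldl_map]
  have hH : ∀ col, pvGetColumnHeight col
      = (col.map (fun kv : String × List Int => PySem.List.pyGetD kv.2 1 0)).sum := by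
    intro col
    unfold pvGetColumnHeight
    induction col using List.reverseRecOn with
    | nil => simp
    | append_singleton xs x ih => simp [ih]
  simp only [hH]

-- ===== VERDICT (by name: the statement is the Claim_ definition above) =====
theorem find_perimeter_of_column_stacking_spec : Claim_equal_find_perimeter_of_column_stacking := by
  intro columns num_columns inc _ _
  unfold Spec_find_perimeter_of_column_stacking
  unfold find_perimeter_of_column_stacking find_perimeter_of_column_stacking_alt
  simp only [pvCalcTotalWidth_closed, pvHeight_eq]
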